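-- pv_equiv track=rewrite | github.com/Kmarspython/Farkle | Farkle/Points.py | keeping
-- ===== SOURCE A (Python) =====
-- def keeping(selected, one, two, three, four, five, six):
--     """Determines if the selected list is in any of the points dictionaries"""
--     sorted_selected = sorted(selected[:])
--     index_dic = {1: one, 2: two, 3: three, 4: four, 5: five, 6: six}
--     points = 0
--     x = 0
--     if not selected:
--         return False, points
--     while len(sorted_selected) > 0:
--         if len(sorted_selected) - x == 0:
--             points = 0
--             break
--         for n in index_dic[len(sorted_selected) - x].keys():
--             temp = sorted(n)
--             if check_sublist(sorted_selected, temp):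
--                 points += index_dic[len(sorted_selected) - x][n]
--                 for r in temp:
--                     sorted_selected.remove(r)
--                 x = 0
--                 break
--         else:
--             x += 1
--
--     return False if sorted_selected != [] else True, points
--
-- def check_sublist(mainlist, sublist):
--     """checks if sublist is a sublist of list"""
--     a = mainlist[:]
--     b = sublist[:]
--     for item in sublist:
--         if item in a:
--             b.remove(item)
--             a.remove(item)
--         else:
--             return False
--         if not b:
--             return True
-- ===== SOURCE B (Python) =====
-- def keeping(selected, one, two, three, four, five, six):
--     """Flatten the six class dictionaries once into a single search list ordered
--     by descending class, then recursively consume the dice: at each step one scan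
--     of the flat list (skipping classes larger than the remaining count) finds the
--     combination to score; the remaining dice are kept as a sorted list and the
--     sub-multiset test/removal is a single merge pass over the two sorted lists."""
--     if not selected:
--         return False, 0
--     flat = [(cls, sorted(key), pts)
--             for cls, dic in ((6, six), (5, five), (4, four), (3, three), (2, two), (1, one))
--             for key, pts in dic.items()]
--
--     def minus(rem, key):
--         """rem \\ key for sorted lists, merge-style; None if key is not contained."""
--         if not key:
--             return rem
--         if not rem:
--             return None
--         r, v = rem[0], key[0]
--         if r < v:
--             rest = minus(rem[1:], key)
--             return None if rest is None else [r] + rest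
--         if r == v:
--             return minus(rem[1:], key[1:])
--         return None
--
--     def go(rem, points):
--         for cls, key, pts in flat:
--             if key and cls <= len(rem):
--                 rest = minus(rem, key)
--                 if rest is not None:
--                     return (True, points + pts) if not rest else go(rest, points + pts)
--         return False, 0
--
--     return go(sorted(selected), 0)
-- ===== Notes on version B (the rewrite author's own statement) =====
-- stated objective: alternative
-- what changed: Replaces A's while/x state machine over six separate dicts (re-sorting every key and testing containment with the remove-one-by-one check_sublist helper) by a single flattened class-ordered search list built once, a recursive consume step, and a merge pass over two sorted lists that tests sub-multiset containment and removes the matched dice in one traversal.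
-- outside the precondition, e.g. on keeping([1, 1, 1, 1, 1, 1, 1], {}, {}, {}, {}, {}, {}): A raises KeyError, B returns (False, 0)
import Mathlib
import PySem

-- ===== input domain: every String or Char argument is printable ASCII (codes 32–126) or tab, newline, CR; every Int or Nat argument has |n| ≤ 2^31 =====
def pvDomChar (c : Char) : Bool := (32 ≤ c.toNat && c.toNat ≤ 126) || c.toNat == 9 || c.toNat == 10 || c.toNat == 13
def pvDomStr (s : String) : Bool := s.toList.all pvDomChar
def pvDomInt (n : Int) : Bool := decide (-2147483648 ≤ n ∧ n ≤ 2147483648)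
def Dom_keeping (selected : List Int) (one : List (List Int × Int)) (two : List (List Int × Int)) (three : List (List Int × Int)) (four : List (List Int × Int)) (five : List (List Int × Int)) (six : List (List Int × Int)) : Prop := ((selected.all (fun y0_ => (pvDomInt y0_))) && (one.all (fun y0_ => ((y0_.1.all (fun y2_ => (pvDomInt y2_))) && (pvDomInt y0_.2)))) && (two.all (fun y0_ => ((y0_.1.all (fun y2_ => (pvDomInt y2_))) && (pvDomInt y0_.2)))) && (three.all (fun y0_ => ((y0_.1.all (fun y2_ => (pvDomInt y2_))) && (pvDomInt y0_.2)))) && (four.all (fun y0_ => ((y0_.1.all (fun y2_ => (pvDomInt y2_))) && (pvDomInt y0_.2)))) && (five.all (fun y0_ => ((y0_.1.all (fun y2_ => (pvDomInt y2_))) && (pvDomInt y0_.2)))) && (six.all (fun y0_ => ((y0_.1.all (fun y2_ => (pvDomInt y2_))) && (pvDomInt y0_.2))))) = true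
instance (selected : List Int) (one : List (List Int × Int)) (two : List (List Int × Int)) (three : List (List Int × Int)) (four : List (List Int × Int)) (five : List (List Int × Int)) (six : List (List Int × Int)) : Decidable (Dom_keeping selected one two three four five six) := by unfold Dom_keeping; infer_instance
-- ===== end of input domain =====

-- B flattens the six class dicts into one descending-class search list built once, consumes
-- the dice recursively, and tests/removes a combination with one merge pass over two sorted
-- lists ('alternative'); the equivalence is about return values only (neither mutates input).

-- ===== PORT A =====

-- Python list.remove(v): removes the first occurrence; exact whenever v is present,
-- which holds at every call site below (Python would raise ValueError otherwise).
def pvRemoveFirst (l : List Int) (v : Int) : List Int := l.erase v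

-- the for-loop body of check_sublist over (remaining sublist items, a, b);
-- falling off the loop returns Python None, which the caller's `if` reads as false
def pvCheckSub : List Int → List Int → List Int → Bool
  | [], _, _ => false
  | item :: rest, a, b =>
    if a.contains item then
      let b' := pvRemoveFirst b item
      let a' := pvRemoveFirst a item
      if b' = [] then true else pvCheckSub rest a' b'
    else false

def check_sublist (mainlist : List Int) (sublist : List Int) : Bool :=
  pvCheckSub sublist mainlist sublist

-- index_dic[len-x][n]: dict lookup (first match); KeyError unreachable (n comes from the keys)
def pvLookup : List (List Int × Int) → List Int → Int
  | [], _ => 0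
  | (k, v) :: rest, n => if k = n then v else pvLookup rest n

-- the inner `for n in index_dic[...].keys():` loop: first key whose sorted copy passes check_sublist
def pvScanA (d : List (List Int × Int)) (s : List Int) : List (List Int) → Option (List Int × Int)
  | [] => none
  | n :: rest =>
    let temp := PySem.List.sorted n (fun y => y) false
    if check_sublist s temp then some (temp, pvLookup d n) else pvScanA d s rest

-- index_dic = {1: one, …, 6: six}; other keys are KeyError (unreachable under Pre_keeping)
def pvIndexA (one two three four five six : List (List Int × Int)) (k : Nat) : List (List Int × Int) :=
  if k = 1 then one else if k = 2 then two else if k = 3 then three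
  else if k = 4 then four else if k = 5 then five else if k = 6 then six else []

-- the while loop: state (sorted_selected, x, points), returning the final (sorted_selected, points).
-- The first argument is pure fuel (one unit per while-iteration); keeping passes
-- (len+1)*(len+1), provably more iterations than the loop can make, so the 0 case
-- (returning the current state unchanged) is never reached from keeping.
-- x ≤ len(sorted_selected) on every reachable state, so Nat subtraction is exact here.
def aLoop (one two three four five six : List (List Int × Int)) :
    Nat → List Int → Nat → Int → List Int × Int
  | 0, s, _, points => (s, points)
  | fuel + 1, s, x, points =>
    if s.length = 0 then (s, points)
    else if s.length - x = 0 then (s, 0)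
    else
      let d := pvIndexA one two three four five six (s.length - x)
      match pvScanA d s (d.map (·.1)) with
      | some (temp, pts) =>
          aLoop one two three four five six fuel (temp.foldl pvRemoveFirst s) 0 (points + pts)
      | none => aLoop one two three four five six fuel s (x + 1) points

def keeping (selected : List Int) (one : List (List Int × Int)) (two : List (List Int × Int)) (three : List (List Int × Int)) (four : List (List Int × Int)) (five : List (List Int × Int)) (six : List (List Int × Int)) : Bool × Int :=
  let sorted_selected := PySem.List.sorted selected (fun y => y) false
  if selected = [] then (false, 0)
  else
    let r := aLoop one two three four five six
      ((sorted_selected.length + 1) * (sorted_selected.length + 1)) sorted_selected 0 0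
    (if r.1 ≠ [] then false else true, r.2)

-- ===== PORT B =====

-- Source B's flat search list: each dict's items tagged with its class, classes 6 down to 1,
-- keys sorted once at build time
def bFlat (one two three four five six : List (List Int × Int)) : List (Int × List Int × Int) :=
  six.map (fun p => ((6 : Int), PySem.List.sorted p.1 (fun y => y) false, p.2)) ++
  five.map (fun p => ((5 : Int), PySem.List.sorted p.1 (fun y => y) false, p.2)) ++
  four.map (fun p => ((4 : Int), PySem.List.sorted p.1 (fun y => y) false, p.2)) ++
  three.map (fun p => ((3 : Int), PySem.List.sorted p.1 (fun y => y) false, p.2)) ++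
  two.map (fun p => ((2 : Int), PySem.List.sorted p.1 (fun y => y) false, p.2)) ++
  one.map (fun p => ((1 : Int), PySem.List.sorted p.1 (fun y => y) false, p.2))

-- Source B's minus(rem, key): rem \ key for sorted lists, merge-style; none = not contained
def bMinus : List Int → List Int → Option (List Int)
  | rem, [] => some rem
  | [], _ :: _ => none
  | r :: rs, v :: vs =>
    if r < v then (bMinus rs (v :: vs)).map (r :: ·)
    else if r = v then bMinus rs vs
    else none

-- the `for cls, key, pts in flat:` loop of go: first entry with a nonempty key, class
-- within the remaining count, whose key subtracts from rem; returns (rest, pts)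
def bScanB (rem : List Int) : List (Int × List Int × Int) → Option (List Int × Int)
  | [] => none
  | (cls, key, pts) :: fs =>
    if key ≠ [] ∧ cls ≤ (rem.length : Int) then
      match bMinus rem key with
      | some rest => some (rest, pts)
      | none => bScanB rem fs
    else bScanB rem fs

-- Source B's recursive go(rem, points). The Nat argument is pure fuel, one unit per recursive
-- call; keeping_alt passes the initial rem length, an upper bound on the recursion depth
-- (each step strictly shrinks rem), so the 0 case is never reached from keeping_alt.
def bGo (flat : List (Int × List Int × Int)) :
    Nat → List Int → Int → Bool × Int
  | 0, _, _ => (false, 0)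
  | fuel + 1, rem, points =>
    match bScanB rem flat with
    | none => (false, 0)
    | some (rest, pts) =>
      if rest = [] then (true, points + pts)
      else bGo flat fuel rest (points + pts)

def keeping_alt (selected : List Int) (one : List (List Int × Int)) (two : List (List Int × Int)) (three : List (List Int × Int)) (four : List (List Int × Int)) (five : List (List Int × Int)) (six : List (List Int × Int)) : Bool × Int :=
  if selected = [] then (false, 0)
  else
    let ss := PySem.List.sorted selected (fun y => y) false
    bGo (bFlat one two three four five six) ss.length ss 0

-- ===== PRECONDITION & SPEC =====
-- Pre_ excludes inputs with more than six selected dice, on which A raises KeyError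
-- (index_dic has keys 1..6 only); B returns a value there — see Raises_keeping.
def Pre_keeping (selected : List Int) (one : List (List Int × Int)) (two : List (List Int × Int)) (three : List (List Int × Int)) (four : List (List Int × Int)) (five : List (List Int × Int)) (six : List (List Int × Int)) : Prop :=
  selected.length ≤ 6
instance (selected : List Int) (one : List (List Int × Int)) (two : List (List Int × Int)) (three : List (List Int × Int)) (four : List (List Int × Int)) (five : List (List Int × Int)) (six : List (List Int × Int)) : Decidable (Pre_keeping selected one two three four five six) := by unfold Pre_keeping; infer_instance

def pvWitness_keeping : List Int × (List (List Int × Int)) × (List (List Int × Int)) × (List (List Int × Int)) × (List (List Int × Int)) × (List (List Int × Int)) × (List (List Int × Int)) :=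
  ([1, 5], [([1], 100), ([5], 50)], [], [], [], [], [])

def Spec_keeping (selected : List Int) (one : List (List Int × Int)) (two : List (List Int × Int)) (three : List (List Int × Int)) (four : List (List Int × Int)) (five : List (List Int × Int)) (six : List (List Int × Int)) (out : Bool × Int) : Prop := out = keeping_alt selected one two three four five six
instance (selected : List Int) (one : List (List Int × Int)) (two : List (List Int × Int)) (three : List (List Int × Int)) (four : List (List Int × Int)) (five : List (List Int × Int)) (six : List (List Int × Int)) (out : Bool × Int) : Decidable (Spec_keeping selected one two three four five six out) := by unfold Spec_keeping; infer_instance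

-- ===== CLAIM (what is proved, stated in full; the proofs are below) =====
def Claim_equal_keeping : Prop := ∀ (selected : List Int) (one : List (List Int × Int)) (two : List (List Int × Int)) (three : List (List Int × Int)) (four : List (List Int × Int)) (five : List (List Int × Int)) (six : List (List Int × Int)), Dom_keeping selected one two three four five six → Pre_keeping selected one two three four five six → Spec_keeping selected one two three four five six (keeping selected one two three four five six)

-- ===== LEMMAS AND PROOFS =====

theorem pvCheckSub_iff (t a b : List Int) (hperm : b.Perm t) :
    pvCheckSub t a b = true ↔ t ≠ [] ∧ ∀ v, t.count v ≤ a.count v := by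
  induction t generalizing a b with
  | nil => simp [pvCheckSub]
  | cons item rest ih =>
    rw [pvCheckSub]
    by_cases hca : a.contains item
    · have hmem : item ∈ a := List.contains_iff_mem.mp hca
      have hcnt : 1 ≤ a.count item := List.one_le_count_iff.mpr hmem
      have hperm' : (pvRemoveFirst b item).Perm rest := by
        have := hperm.erase item
        simpa [pvRemoveFirst] using this
      by_cases hb0 : pvRemoveFirst b item = []
      · have hrest : rest = [] := by
          rw [hb0] at hperm'; exact hperm'.symm.eq_nil
        subst hrest
        simp only [hca, if_true, hb0, if_true]
        constructor
        · intro _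
          refine ⟨by simp, fun v => ?_⟩
          rcases eq_or_ne item v with hv | hv
          · subst hv; simpa using hcnt
          · simp [List.count_cons, hv, Ne.symm hv]
        · intro _; trivial
      · have hrest : rest ≠ [] := by
          intro hr; rw [hr] at hperm'; exact hb0 hperm'.eq_nil
        simp only [hca, if_true, hb0, if_false]
        rw [ih (pvRemoveFirst a item) (pvRemoveFirst b item) hperm']
        constructor
        · rintro ⟨-, hall⟩
          refine ⟨by simp, fun v => ?_⟩
          have hv := hall v
          simp only [pvRemoveFirst, List.count_erase, List.count_cons] at hv ⊢
          rcases eq_or_ne item v with hvi | hvi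
          · subst hvi; simp at hv ⊢; omega
          · simp [hvi, Ne.symm hvi] at hv ⊢; omega
        · rintro ⟨-, hall⟩
          refine ⟨hrest, fun v => ?_⟩
          have hv := hall v
          simp only [pvRemoveFirst, List.count_erase, List.count_cons] at hv ⊢
          rcases eq_or_ne item v with hvi | hvi
          · subst hvi; simp at hv ⊢; omega
          · simp [hvi, Ne.symm hvi] at hv ⊢; omega
    · have hmem : item ∉ a := fun h => hca (List.contains_iff_mem.mpr h)
      simp only [hca, if_false]
      constructor
      · intro h; exact absurd h (by simp)
      · rintro ⟨-, hall⟩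
        have h2 := hall item
        rw [List.count_eq_zero_of_not_mem hmem] at h2
        simp [List.count_cons] at h2

theorem check_sublist_iff (a t : List Int) :
    check_sublist a t = true ↔ t ≠ [] ∧ ∀ v, t.count v ≤ a.count v :=
  pvCheckSub_iff t a t (List.Perm.refl t)

theorem pvLookup_first (pre rest : List (List Int × Int)) (n : List Int) (v : Int)
    (hpre : ∀ p ∈ pre, p.1 ≠ n) : pvLookup (pre ++ (n, v) :: rest) n = v := by
  induction pre with
  | nil => simp [pvLookup]
  | cons p pre' ih =>
    obtain ⟨k, w⟩ := p
    have hk : k ≠ n := hpre (k, w) (by simp)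
    simp only [List.cons_append, pvLookup, hk, if_false]
    exact ih (fun q hq => hpre q (by simp [hq]))

theorem eraseAll_count (t s : List Int) (hle : ∀ v, t.count v ≤ s.count v) :
    ∀ v, (t.foldl pvRemoveFirst s).count v = s.count v - t.count v := by
  induction t generalizing s with
  | nil => simp
  | cons u rest ih =>
    intro v
    have hu : u ∈ s := List.one_le_count_iff.mp (le_trans (by simp [List.count_cons]) (hle u))
    have hle' : ∀ w, rest.count w ≤ (pvRemoveFirst s u).count w := by
      intro w
      have hw2 := hle w
      simp only [pvRemoveFirst, List.count_erase, List.count_cons] at hw2 ⊢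
      rcases eq_or_ne u w with hw | hw
      · subst hw; simp at hw2 ⊢; omega
      · simp [hw, Ne.symm hw] at hw2 ⊢; omega
    simp only [List.foldl_cons]
    rw [ih (pvRemoveFirst s u) hle' v]
    have hcu : 1 ≤ s.count u := List.one_le_count_iff.mpr hu
    simp only [pvRemoveFirst, List.count_erase, List.count_cons]
    rcases eq_or_ne u v with hw | hw
    · subst hw; simp; omega
    · simp [hw, Ne.symm hw]

theorem eraseAll_length (t s : List Int) (hle : ∀ v, t.count v ≤ s.count v) :
    t.length ≤ s.length ∧ (t.foldl pvRemoveFirst s).length = s.length - t.length := by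
  induction t generalizing s with
  | nil => simp
  | cons u rest ih =>
    have hu : u ∈ s := List.one_le_count_iff.mp (le_trans (by simp [List.count_cons]) (hle u))
    have hle' : ∀ w, rest.count w ≤ (pvRemoveFirst s u).count w := by
      intro w
      have hw2 := hle w
      simp only [pvRemoveFirst, List.count_erase, List.count_cons] at hw2 ⊢
      rcases eq_or_ne u w with hw | hw
      · subst hw; simp at hw2 ⊢; omega
      · simp [hw, Ne.symm hw] at hw2 ⊢; omega
    have hlen : (pvRemoveFirst s u).length = s.length - 1 := by
      simp [pvRemoveFirst, List.length_erase_of_mem hu]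
    have hpos : 0 < s.length := List.length_pos_of_mem hu
    obtain ⟨h1, h2⟩ := ih (pvRemoveFirst s u) hle'
    simp only [List.foldl_cons, List.length_cons]
    constructor
    · omega
    · rw [h2, hlen]; omega

theorem foldl_erase_pairwise (t : List Int) :
    ∀ s : List Int, s.Pairwise (· ≤ ·) → (t.foldl pvRemoveFirst s).Pairwise (· ≤ ·) := by
  induction t with
  | nil => intro s hs; simpa using hs
  | cons u rest ih =>
    intro s hs
    simp only [List.foldl_cons]
    exact ih _ (List.Pairwise.sublist (List.erase_sublist ..) hs)

theorem bMinus_counts : ∀ (s key rest : List Int), bMinus s key = some rest →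
    ∀ v, rest.count v + key.count v = s.count v := by
  intro s
  induction s with
  | nil =>
    intro key rest h v
    cases key with
    | nil => simp [bMinus] at h; subst h; simp
    | cons a l => simp [bMinus] at h
  | cons r rs ih =>
    intro key rest h v
    cases key with
    | nil => simp [bMinus] at h; subst h; simp
    | cons a l =>
      simp only [bMinus] at h
      split at h
      · rename_i hlt
        cases hm : bMinus rs (a :: l) with
        | none => rw [hm] at h; simp at h
        | some rest' =>
          rw [hm] at h
          simp only [Option.map_some, Option.some.injEq] at h
          subst h
          have := ih (a :: l) rest' hm v
          simp only [List.count_cons] at this ⊢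
          omega
      · split at h
        · rename_i hlt heq
          subst heq
          have := ih l rest h v
          simp only [List.count_cons] at this ⊢
          omega
        · simp at h

theorem bMinus_sublist : ∀ (s key rest : List Int), bMinus s key = some rest → rest.Sublist s := by
  intro s
  induction s with
  | nil =>
    intro key rest h
    cases key with
    | nil => simp [bMinus] at h; subst h; simp
    | cons a l => simp [bMinus] at h
  | cons r rs ih =>
    intro key rest h
    cases key with
    | nil => simp [bMinus] at h; subst h; exact List.Sublist.refl _
    | cons a l =>
      simp only [bMinus] at h
      split at h
      · cases hm : bMinus rs (a :: l) with
        | none => rw [hm] at h; simp at h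
        | some rest' =>
          rw [hm] at h
          simp only [Option.map_some, Option.some.injEq] at h
          subst h
          exact List.Sublist.cons₂ r (ih (a :: l) rest' hm)
      · split at h
        · exact List.Sublist.cons r (ih l rest h)
        · simp at h

theorem bMinus_isSome : ∀ (s key : List Int), s.Pairwise (· ≤ ·) → key.Pairwise (· ≤ ·) →
    (∀ v, key.count v ≤ s.count v) → ∃ rest, bMinus s key = some rest := by
  intro s
  induction s with
  | nil =>
    intro key _ _ hc
    cases key with
    | nil => exact ⟨[], rfl⟩
    | cons a l =>
      have := hc a
      simp [List.count_cons] at this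
  | cons r rs ih =>
    intro key hs hk hc
    cases key with
    | nil => exact ⟨r :: rs, rfl⟩
    | cons a l =>
      rw [List.pairwise_cons] at hs
      rcases lt_trichotomy r a with hlt | heq | hgt
      · have hra : r ≠ a := ne_of_lt hlt
        have hrl : r ∉ l := by
          intro hm
          have := (List.pairwise_cons.mp hk).1 r hm
          omega
        have hc' : ∀ v, (a :: l).count v ≤ rs.count v := by
          intro v
          rcases eq_or_ne v r with hv | hv
          · rw [hv, List.count_eq_zero_of_not_mem (by simp [hra, hrl])]
            exact Nat.zero_le _
          · have hcv := hc v
            rw [List.count_cons_of_ne (Ne.symm hv)] at hcv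
            exact hcv
        obtain ⟨rest', hm⟩ := ih (a :: l) hs.2 hk hc'
        exact ⟨r :: rest', by simp [bMinus, hlt, hm]⟩
      · subst heq
        have hc' : ∀ v, l.count v ≤ rs.count v := by
          intro v
          have hcv := hc v
          rcases eq_or_ne v r with hv | hv
          · rw [hv] at hcv ⊢
            rw [List.count_cons_self, List.count_cons_self] at hcv
            omega
          · rw [List.count_cons_of_ne (Ne.symm hv), List.count_cons_of_ne (Ne.symm hv)] at hcv
            exact hcv
        obtain ⟨rest, hm⟩ := ih l hs.2 (List.pairwise_cons.mp hk).2 hc'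
        exact ⟨rest, by simp [bMinus, hm]⟩
      · exfalso
        have har : a ≠ r := ne_of_lt hgt
        have hars : a ∉ rs := by
          intro hm
          have := hs.1 a hm
          omega
        have hca := hc a
        rw [List.count_cons_self, List.count_cons_of_ne (Ne.symm har),
          List.count_eq_zero_of_not_mem hars] at hca
        omega

theorem bMinus_eq_fold (s temp rest : List Int) (hs : s.Pairwise (· ≤ ·))
    (h : bMinus s temp = some rest) : rest = temp.foldl pvRemoveFirst s := by
  have hcnt := bMinus_counts s temp rest h
  have hle : ∀ v, temp.count v ≤ s.count v := fun v => by have := hcnt v; omega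
  have hfold := eraseAll_count temp s hle
  have hperm : rest.Perm (temp.foldl pvRemoveFirst s) := by
    rw [List.perm_iff_count]
    intro v
    rw [hfold v]
    have := hcnt v
    omega
  exact List.Perm.eq_of_pairwise'
    (List.Pairwise.sublist (bMinus_sublist s temp rest h) hs)
    (foldl_erase_pairwise temp s hs) hperm

-- the per-class scan: A's key scan with check_sublist + lookup equals B's scan of the
-- class's tagged entries, with B stepping to the removed state directly
theorem scan_class (s : List Int) (hs : s.Pairwise (· ≤ ·)) (j : Int) (hj : j ≤ (s.length : Int)) :
    ∀ (d pre : List (List Int × Int)) (tail : List (Int × List Int × Int)),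
    (∀ p ∈ pre, check_sublist s (PySem.List.sorted p.1 (fun y => y) false) = false) →
    bScanB s (d.map (fun p => (j, PySem.List.sorted p.1 (fun y => y) false, p.2)) ++ tail)
      = (match pvScanA (pre ++ d) s (d.map (·.1)) with
         | some (temp, pts) => some (temp.foldl pvRemoveFirst s, pts)
         | none => bScanB s tail) := by
  intro d
  induction d with
  | nil => intro pre tail _; simp [pvScanA]
  | cons p d' ih =>
    intro pre tail hpre
    obtain ⟨key, pts⟩ := p
    have hts : (PySem.List.sorted key (fun y => y) false).Pairwise (· ≤ ·) := by
      have := PySem.List.sorted_pairwise key (fun y => y)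
      simpa using this
    simp only [List.map_cons, List.cons_append, pvScanA, bScanB]
    by_cases hck : check_sublist s (PySem.List.sorted key (fun y => y) false) = true
    · obtain ⟨hne, hle⟩ := (check_sublist_iff s _).mp hck
      obtain ⟨rest, hm⟩ := bMinus_isSome s _ hs hts hle
      have hguard : (PySem.List.sorted key (fun y => y) false ≠ [] ∧ j ≤ (s.length : Int)) :=
        ⟨hne, hj⟩
      rw [if_pos hguard, hm, if_pos hck]
      have hlk : pvLookup (pre ++ (key, pts) :: d') key = pts := by
        apply pvLookup_first
        intro q hq hqk
        have h3 := hpre q hq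
        rw [hqk] at h3
        simp [hck] at h3
      rw [hlk, bMinus_eq_fold s _ rest hs hm]
    · have hck' : check_sublist s (PySem.List.sorted key (fun y => y) false) = false := by
        cases hcs : check_sublist s (PySem.List.sorted key (fun y => y) false) with
        | false => rfl
        | true => exact absurd hcs hck
      rw [if_neg hck]
      have hrec : bScanB s (d'.map (fun p => (j, PySem.List.sorted p.1 (fun y => y) false, p.2)) ++ tail)
          = (match pvScanA ((pre ++ [(key, pts)]) ++ d') s (d'.map (·.1)) with
             | some (temp, pts) => some (temp.foldl pvRemoveFirst s, pts)
             | none => bScanB s tail) := by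
        apply ih
        intro q hq
        rcases List.mem_append.mp hq with h | h
        · exact hpre q h
        · simp at h; subst h; exact hck'
      have hpp : (pre ++ [(key, pts)]) ++ d' = pre ++ (key, pts) :: d' := by simp
      rw [hpp] at hrec
      by_cases hne : PySem.List.sorted key (fun y => y) false ≠ []
      · have hbm : bMinus s (PySem.List.sorted key (fun y => y) false) = none := by
          cases hm : bMinus s (PySem.List.sorted key (fun y => y) false) with
          | none => rfl
          | some rest =>
            exfalso
            have hcnt := bMinus_counts s _ rest hm
            have hle : ∀ v, (PySem.List.sorted key (fun y => y) false).count v ≤ s.count v :=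
              fun v => by have := hcnt v; omega
            exact absurd ((check_sublist_iff s _).mpr ⟨hne, hle⟩) (by simp [hck'])
        rw [if_pos ⟨hne, hj⟩, hbm]
        exact hrec
      · rw [if_neg (by tauto)]
        exact hrec

-- classes L..1 of the flat list, outermost first (proof-only view of bFlat)
def bFlatLe (one two three four five six : List (List Int × Int)) : Nat → List (Int × List Int × Int)
  | 0 => []
  | k + 1 =>
    (pvIndexA one two three four five six (k + 1)).map
      (fun p => (((k + 1 : Nat) : Int), PySem.List.sorted p.1 (fun y => y) false, p.2)) ++
    bFlatLe one two three four five six k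

theorem bFlat_eq (one two three four five six : List (List Int × Int)) :
    bFlat one two three four five six = bFlatLe one two three four five six 6 := by
  simp only [bFlat, bFlatLe, pvIndexA]
  norm_num

theorem bScanB_append_skip (s : List Int) (xs ys : List (Int × List Int × Int))
    (h : ∀ e ∈ xs, ¬((e.2.1 : List Int) ≠ [] ∧ e.1 ≤ (s.length : Int))) :
    bScanB s (xs ++ ys) = bScanB s ys := by
  induction xs with
  | nil => simp
  | cons e xs' ih =>
    obtain ⟨cls, key, pts⟩ := e
    have he := h (cls, key, pts) (by simp)
    simp only [List.cons_append, bScanB]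
    rw [if_neg he]
    exact ih (fun e' he' => h e' (by simp [he']))

theorem bFlatLe_skip (one two three four five six : List (List Int × Int)) (s : List Int) :
    ∀ L : Nat, s.length ≤ L →
    bScanB s (bFlatLe one two three four five six L) =
      bScanB s (bFlatLe one two three four five six s.length) := by
  intro L
  induction L with
  | zero => intro h; have : s.length = 0 := by omega
            rw [this]
  | succ k ih =>
    intro h
    rcases eq_or_lt_of_le h with heq | hlt
    · rw [heq]
    · have hk : s.length ≤ k := by omega
      rw [bFlatLe]
      rw [bScanB_append_skip]
      · exact ih hk
      · intro e he
        simp only [List.mem_map] at he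
        obtain ⟨p, _, hp⟩ := he
        subst hp
        simp only
        intro ⟨_, hle⟩
        have : (s.length : Int) < ((k + 1 : Nat) : Int) := by exact_mod_cast hlt
        omega

theorem pvScanA_some (d : List (List Int × Int)) (s : List Int) :
    ∀ (ns : List (List Int)) (temp : List Int) (pts : Int),
    pvScanA d s ns = some (temp, pts) → check_sublist s temp = true := by
  intro ns
  induction ns with
  | nil => intro temp pts h; simp [pvScanA] at h
  | cons n rest ih =>
    intro temp pts h
    simp only [pvScanA] at h
    split at h
    · rename_i hck
      cases h
      exact hck
    · exact ih temp pts h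

theorem aLoop_nil (one two three four five six : List (List Int × Int)) (f x : Nat) (p : Int) :
    aLoop one two three four five six f [] x p = ([], p) := by
  cases f <;> simp [aLoop]

-- A's x-descent from state (s, x) equals B's single scan of classes (len s - x)..1
theorem aLoop_descent (one two three four five six : List (List Int × Int))
    (s : List Int) (hs : s.Pairwise (· ≤ ·)) (hne : s ≠ []) :
    ∀ (x fuel : Nat) (points : Int), x ≤ s.length →
      (s.length + 1) * (s.length + 1) ≤ fuel + x →
    (match bScanB s (bFlatLe one two three four five six (s.length - x)) with
     | none => aLoop one two three four five six fuel s x points = (s, 0)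
     | some (rest, pts) => ∃ fuel',
         (rest.length + 1) * (rest.length + 1) ≤ fuel' ∧
         rest.length < s.length ∧ rest.Pairwise (· ≤ ·) ∧
         aLoop one two three four five six fuel s x points =
           aLoop one two three four five six fuel' rest 0 (points + pts)) := by
  intro x fuel
  induction fuel generalizing x with
  | zero =>
    intro points hx hf
    exfalso
    have h1 : s.length + 1 ≤ (s.length + 1) * (s.length + 1) :=
      Nat.le_mul_of_pos_right _ (by omega)
    omega
  | succ fuel ih =>
    intro points hx hf
    have hslen : s.length ≠ 0 := by simpa [List.length_eq_zero_iff] using hne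
    by_cases hx0 : s.length - x = 0
    · rw [hx0]
      simp only [bFlatLe, bScanB]
      rw [aLoop]
      simp [hslen, hx0]
    · obtain ⟨k, hk⟩ : ∃ k, s.length - x = k + 1 := ⟨s.length - x - 1, by omega⟩
      rw [hk, bFlatLe]
      have hj : ((k + 1 : Nat) : Int) ≤ (s.length : Int) := by
        have : k + 1 ≤ s.length := by omega
        exact_mod_cast this
      have hscan := scan_class s hs ((k + 1 : Nat) : Int) hj
        (pvIndexA one two three four five six (k + 1)) []
        (bFlatLe one two three four five six k) (by simp)
      simp only [List.nil_append] at hscan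
      rw [hscan]
      rw [show pvIndexA one two three four five six (k + 1)
            = pvIndexA one two three four five six (s.length - x) from by rw [hk]]
      cases hsa : pvScanA (pvIndexA one two three four five six (s.length - x)) s
          ((pvIndexA one two three four five six (s.length - x)).map (·.1)) with
      | none =>
        simp only
        have hstep : aLoop one two three four five six (fuel + 1) s x points =
            aLoop one two three four five six fuel s (x + 1) points := by
          rw [aLoop]
          simp [hslen, hx0, hsa]
        have hrec := ih (x + 1) points (by omega) (by omega)
        rw [show s.length - (x + 1) = k from by omega] at hrec
        rw [hstep]
        exact hrec
      | some r =>
        obtain ⟨temp, pts⟩ := r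
        simp only
        -- temp passed check_sublist, so it is nonempty and contained in s
        obtain ⟨htne, htle⟩ :=
          (check_sublist_iff s temp).mp (pvScanA_some _ s _ temp pts hsa)
        obtain ⟨hlen_le, hlen_eq⟩ := eraseAll_length temp s htle
        have ht1 : 1 ≤ temp.length := by
          cases temp with
          | nil => exact absurd rfl htne
          | cons a t => simp
        refine ⟨fuel, ?_, ?_, ?_, ?_⟩
        · have hm : s.length - temp.length + 1 ≤ s.length := by omega
          have h2 : (s.length - temp.length + 1) * (s.length - temp.length + 1) ≤
              s.length * s.length := Nat.mul_le_mul hm hm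
          rw [hlen_eq]
          nlinarith [hf, hx, h2]
        · rw [hlen_eq]; omega
        · exact foldl_erase_pairwise temp s hs
        · rw [aLoop]
          simp [hslen, hx0, hsa]

-- A's whole loop (plus keeping's wrap-up) equals B's recursive go
theorem loop_sim (one two three four five six : List (List Int × Int)) :
    ∀ (fb : Nat) (s : List Int) (points : Int) (fa : Nat),
    s.Pairwise (· ≤ ·) → s ≠ [] → s.length ≤ 6 → s.length ≤ fb →
    (s.length + 1) * (s.length + 1) ≤ fa →
    (if (aLoop one two three four five six fa s 0 points).1 ≠ [] then false else true,
      (aLoop one two three four five six fa s 0 points).2) =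
      bGo (bFlat one two three four five six) fb s points := by
  intro fb
  induction fb with
  | zero =>
    intro s points fa _ hne h6 hfb hfa
    exfalso
    have : 0 < s.length := List.length_pos_iff.mpr hne
    omega
  | succ g ih =>
    intro s points fa hs hne h6 hfb hfa
    rw [bGo]
    rw [bFlat_eq, bFlatLe_skip one two three four five six s 6 h6]
    have hmain := aLoop_descent one two three four five six s hs hne 0 fa points
      (by omega) (by simpa using hfa)
    rw [Nat.sub_zero] at hmain
    cases hsc : bScanB s (bFlatLe one two three four five six s.length) with
    | none =>
      rw [hsc] at hmain
      simp only at hmain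
      rw [hmain]
      simp [hne]
    | some r =>
      obtain ⟨rest, pts⟩ := r
      rw [hsc] at hmain
      simp only at hmain
      obtain ⟨fa', hfa', hlt, hrs, heq⟩ := hmain
      rw [heq]
      dsimp only
      by_cases hrnil : rest = []
      · subst hrnil
        rw [aLoop_nil]
        simp
      · rw [if_neg hrnil, ← bFlat_eq]
        exact ih rest (points + pts) fa' hrs hrnil (by omega) (by omega) hfa'

-- ===== VERDICT (by name: the statement is the Claim_ definition above) =====
theorem keeping_spec : Claim_equal_keeping := by
  intro selected one two three four five six _ hpre
  unfold Pre_keeping at hpre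
  unfold Spec_keeping keeping keeping_alt
  by_cases hsel : selected = []
  · simp [hsel]
  · have hperm := PySem.List.sorted_perm selected (fun y => y) false
    have hslen : (PySem.List.sorted selected (fun y => y) false).length = selected.length :=
      hperm.length_eq
    have hsne : PySem.List.sorted selected (fun y => y) false ≠ [] := by
      simpa [PySem.List.sorted_eq_nil_iff] using hsel
    have hsp : (PySem.List.sorted selected (fun y => y) false).Pairwise (· ≤ ·) := by
      have := PySem.List.sorted_pairwise selected (fun y => y)
      simpa using this
    simp only [if_neg hsel]
    exact loop_sim one two three four five six
      (PySem.List.sorted selected (fun y => y) false).length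
      (PySem.List.sorted selected (fun y => y) false) 0
      (((PySem.List.sorted selected (fun y => y) false).length + 1) *
        ((PySem.List.sorted selected (fun y => y) false).length + 1))
      hsp hsne (by omega) (by omega) (by omega)
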